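-- pv_equiv track=rewrite | github.com/hyperledger-archives/sawtooth-core | cli/sawtooth_cli/network_command/compare.py | get_node_id_map
-- ===== SOURCE A (Python) =====
-- def get_node_id_map(unreporting, total):
--     node_id_map = {}
--     offset = 0
--     for i in range(total):
--         if i not in unreporting:
--             node_id_map[i - offset] = i
--         else:
--             offset += 1
--     return node_id_map
-- ===== SOURCE B (Python) =====
-- def get_node_id_map(unreporting, total):
--     skips = sorted({u for u in unreporting if 0 <= u < total})
--     values = []
--     prev = 0
--     for u in skips:
--         values.extend(range(prev, u))
--         prev = u + 1
--     values.extend(range(prev, total))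
--     return dict(enumerate(values))
-- ===== Notes on version B (the rewrite author's own statement) =====
-- stated objective: alternative
-- what changed: Replaces A's per-index membership scan with a running offset by a sort-then-block-scan: sort the distinct in-range skip points, emit each gap between consecutive skips as a whole range, and number the kept indices with enumerate; it trades the per-element membership test for a sort plus wholesale range emission.
import Mathlib
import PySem

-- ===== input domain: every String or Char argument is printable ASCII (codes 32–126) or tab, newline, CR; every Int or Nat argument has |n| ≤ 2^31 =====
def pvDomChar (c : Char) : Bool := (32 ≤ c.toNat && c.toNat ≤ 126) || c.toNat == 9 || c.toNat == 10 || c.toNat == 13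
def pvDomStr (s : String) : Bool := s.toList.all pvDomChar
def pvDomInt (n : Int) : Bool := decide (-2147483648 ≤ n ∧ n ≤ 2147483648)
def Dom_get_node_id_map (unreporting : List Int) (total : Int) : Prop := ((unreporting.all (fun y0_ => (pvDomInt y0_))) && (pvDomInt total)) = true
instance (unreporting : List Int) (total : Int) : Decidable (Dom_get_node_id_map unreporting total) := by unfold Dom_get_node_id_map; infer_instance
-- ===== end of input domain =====

-- B replaces A's per-index membership test and running offset by a sort-then-block-scan:
-- it sorts the distinct in-range skip points and emits the whole gap range between
-- consecutive skips at once, then numbers the kept indices with enumerate. (objective: alternative)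

-- ===== PORT A =====
def get_node_id_map (unreporting : List Int) (total : Int) : List (Int × Int) :=
  ((PySem.List.pyRange 0 total).foldl
      (fun (st : PySem.Dict Int Int × Int) i =>
        if !(unreporting.contains i) then (st.1.insert (i - st.2) i, st.2)
        else (st.1, st.2 + 1))
      (PySem.Dict.empty, 0)).1.items

-- ===== PORT B =====
def get_node_id_map_alt (unreporting : List Int) (total : Int) : List (Int × Int) :=
  -- skips = sorted({u for u in unreporting if 0 <= u < total})
  let skips := PySem.List.sorted
    (PySem.Set.ofList (unreporting.filter (fun u => decide (0 ≤ u ∧ u < total))))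
    (fun x => x) false
  -- values = []; prev = 0; for u in skips: values.extend(range(prev, u)); prev = u + 1
  let st := skips.foldl
    (fun (st : List Int × Int) u => (st.1 ++ PySem.List.pyRange st.2 u 1, u + 1)) ([], 0)
  -- values.extend(range(prev, total))
  let values := st.1 ++ PySem.List.pyRange st.2 total 1
  -- return dict(enumerate(values))
  (PySem.Dict.ofList (PySem.List.enumerate values 0)).items

-- ===== PRECONDITION & SPEC =====
def Spec_get_node_id_map (unreporting : List Int) (total : Int) (out : List (Int × Int)) : Prop := out = get_node_id_map_alt unreporting total
instance (unreporting : List Int) (total : Int) (out : List (Int × Int)) : Decidable (Spec_get_node_id_map unreporting total out) := by unfold Spec_get_node_id_map; infer_instance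

-- ===== CLAIM (what is proved, stated in full; the proofs are below) =====
def Claim_equal_get_node_id_map : Prop := ∀ (unreporting : List Int) (total : Int), Dom_get_node_id_map unreporting total → Spec_get_node_id_map unreporting total (get_node_id_map unreporting total)

-- ===== LEMMAS AND PROOFS =====

-- the filtered ("reporting") prefix of range total, shared by both proofs
def pvRep (unreporting : List Int) (t : Int) : List Int :=
  (PySem.List.pyRange 0 t 1).filter (fun i => !(unreporting.contains i))

-- A's loop state after the whole range
def pvALoop (unreporting : List Int) (t : Int) : PySem.Dict Int Int × Int :=
  (PySem.List.pyRange 0 t).foldl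
    (fun (st : PySem.Dict Int Int × Int) i =>
      if !(unreporting.contains i) then (st.1.insert (i - st.2) i, st.2)
      else (st.1, st.2 + 1))
    (PySem.Dict.empty, 0)

-- loop invariant for A: the dict's items are exactly enumerate of the reporting prefix,
-- and the offset counts the skipped (unreporting) indices so far
lemma pvALoop_inv (unreporting : List Int) (n : Nat) :
    (pvALoop unreporting (n : Int)).1.items
        = PySem.List.enumerate (pvRep unreporting (n : Int)) 0
    ∧ (pvALoop unreporting (n : Int)).2
        = (n : Int) - ((pvRep unreporting (n : Int)).length : Int) := by
  induction n with
  | zero => exact ⟨rfl, rfl⟩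
  | succ n ih =>
      obtain ⟨ih1, ih2⟩ := ih
      have hrange : PySem.List.pyRange 0 ((n + 1 : Nat) : Int)
          = PySem.List.pyRange 0 (n : Int) ++ [(n : Int)] := by
        rw [show ((n + 1 : Nat) : Int) = (n : Int) + 1 by push_cast; ring,
          PySem.List.pyRange_one_succ_right (by exact_mod_cast Nat.zero_le n)]
      have hA : pvALoop unreporting ((n + 1 : Nat) : Int)
          = (fun (st : PySem.Dict Int Int × Int) i =>
              if !(unreporting.contains i) then (st.1.insert (i - st.2) i, st.2)
              else (st.1, st.2 + 1)) (pvALoop unreporting (n : Int)) (n : Int) := by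
        unfold pvALoop; rw [hrange, List.foldl_append]; rfl
      by_cases h : unreporting.contains (n : Int) = true
      · -- n is unreporting: dict unchanged, offset + 1; the filter drops n
        have hm : (n : Int) ∈ unreporting := by simpa using h
        have hrep : pvRep unreporting ((n + 1 : Nat) : Int) = pvRep unreporting (n : Int) := by
          unfold pvRep; rw [hrange, List.filter_append]; simp [hm]
        constructor
        · rw [hA]; dsimp only; rw [if_neg (by simp [hm]), ih1, hrep]
        · rw [hA]; dsimp only; rw [if_neg (by simp [hm]), ih2, hrep]; push_cast; ring
      · -- n is reporting: the filter keeps n; the insert key is fresh and appends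
        have hm : (n : Int) ∉ unreporting := by simpa using h
        have hrep : pvRep unreporting ((n + 1 : Nat) : Int)
            = pvRep unreporting (n : Int) ++ [(n : Int)] := by
          unfold pvRep; rw [hrange, List.filter_append]; simp [hm]
        have hkey : (n : Int) - (pvALoop unreporting (n : Int)).2
            = ((pvRep unreporting (n : Int)).length : Int) := by
          rw [ih2]; ring
        have hkeys : (pvALoop unreporting (n : Int)).1.keys
            = PySem.List.pyRange 0 ((pvRep unreporting (n : Int)).length : Int) := by
          simp only [PySem.Dict.keys, ih1]
          simpa using PySem.List.map_fst_enumerate (pvRep unreporting (n : Int)) 0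
        have hfresh : (pvALoop unreporting (n : Int)).1.contains
            (((pvRep unreporting (n : Int)).length : Int)) = false := by
          rw [← Bool.not_eq_true]
          intro hc
          rw [PySem.Dict.contains_iff_mem_keys, hkeys, PySem.List.mem_pyRange_one] at hc
          omega
        constructor
        · rw [hA]; dsimp only
          rw [if_pos (by simp [hm]), hkey, PySem.Dict.items_insert_of_not_contains _ _ hfresh, ih1, hrep,
            PySem.List.enumerate_append]
          simp [PySem.List.enumerate_cons, PySem.List.enumerate_nil]
        · rw [hA]; dsimp only
          rw [if_pos (by simp [hm]), ih2, hrep]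
          simp only [List.length_append, List.length_cons, List.length_nil]
          push_cast; ring

-- B's block loop, abbreviated
def pvStep : List Int × Int → Int → List Int × Int :=
  fun st u => (st.1 ++ PySem.List.pyRange st.2 u 1, u + 1)

-- pulling an already-accumulated values list out of B's foldl
lemma pvStep_acc (skips : List Int) : ∀ (vs : List Int) (lo : Int),
    skips.foldl pvStep (vs, lo)
      = (vs ++ (skips.foldl pvStep ([], lo)).1, (skips.foldl pvStep ([], lo)).2) := by
  induction skips with
  | nil => intro vs lo; simp
  | cons u rest ih =>
      intro vs lo
      simp only [List.foldl_cons, pvStep, List.nil_append]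
      rw [ih (vs ++ PySem.List.pyRange lo u 1) (u + 1), ih (PySem.List.pyRange lo u 1) (u + 1)]
      simp

-- the blocks between consecutive sorted skip points concatenate to the filtered range
lemma pvBlocks_eq (total : Int) : ∀ (skips : List Int) (lo : Int),
    skips.Pairwise (· < ·) → (∀ u ∈ skips, lo ≤ u ∧ u < total) →
    (skips.foldl pvStep ([], lo)).1
        ++ PySem.List.pyRange (skips.foldl pvStep ([], lo)).2 total 1
      = (PySem.List.pyRange lo total 1).filter (fun i => !(skips.contains i)) := by
  intro skips
  induction skips with
  | nil => intro lo _ _; simp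
  | cons u rest ih =>
      intro lo hpw hbd
      have hpw' : rest.Pairwise (· < ·) := hpw.of_cons
      have hgt : ∀ v ∈ rest, u < v := by
        intro v hv; exact (List.pairwise_cons.mp hpw).1 v hv
      have hbu := hbd u (by simp)
      simp only [List.foldl_cons, pvStep, List.nil_append]
      rw [pvStep_acc rest (PySem.List.pyRange lo u 1) (u + 1), List.append_assoc,
        ih (u + 1) hpw' (fun v hv => ⟨by have := hgt v hv; omega, (hbd v (by simp [hv])).2⟩)]
      -- split the full range at u and u+1
      rw [PySem.List.pyRange_one_append lo u total hbu.1 (le_of_lt hbu.2),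
        PySem.List.pyRange_one_cons hbu.2, List.filter_append, List.filter_cons]
      have hu : ((u :: rest).contains u) = true := by simp
      simp only [hu, Bool.not_true, if_neg (by simp : ¬ (false = true))]
      congr 1
      · -- left block: every i < u is in neither u nor rest
        refine (List.filter_eq_self.mpr ?_).symm
        intro i hi
        rw [PySem.List.mem_pyRange_one] at hi
        simp only [Bool.not_eq_eq_eq_not, Bool.not_true, List.contains_eq_mem,
          decide_eq_false_iff_not, List.mem_cons]
        rintro (rfl | hm)
        · omega
        · have := hgt i hm; omega
      · -- right block: i > u, so membership in u :: rest is membership in rest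
        refine (List.filter_congr ?_).symm
        intro i hi
        rw [PySem.List.mem_pyRange_one] at hi
        have hne : i ≠ u := by omega
        simp [List.contains_eq_mem, hne]

-- B's values list is exactly the reporting list
lemma pvB_values (unreporting : List Int) (total : Int) :
    ((PySem.List.sorted
        (PySem.Set.ofList (unreporting.filter (fun u => decide (0 ≤ u ∧ u < total))))
        (fun x => x) false).foldl pvStep ([], 0)).1
      ++ PySem.List.pyRange
          ((PySem.List.sorted
              (PySem.Set.ofList (unreporting.filter (fun u => decide (0 ≤ u ∧ u < total))))
              (fun x => x) false).foldl pvStep ([], 0)).2 total 1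
    = pvRep unreporting total := by
  set skips := PySem.List.sorted
      (PySem.Set.ofList (unreporting.filter (fun u => decide (0 ≤ u ∧ u < total))))
      (fun x => x) false with hsk
  have hmem : ∀ i, i ∈ skips ↔ (i ∈ unreporting ∧ 0 ≤ i ∧ i < total) := by
    intro i
    rw [hsk, PySem.List.mem_sorted, PySem.Set.mem_ofList, List.mem_filter]
    simp
  have hpw : skips.Pairwise (· < ·) := by
    rw [hsk]; exact PySem.List.sorted_ofList_pairwise_lt _
  have hbd : ∀ u ∈ skips, (0 : Int) ≤ u ∧ u < total := fun u hu => ((hmem u).mp hu).2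
  rw [pvBlocks_eq total skips 0 hpw hbd]
  unfold pvRep
  apply List.filter_congr
  intro i hi
  rw [PySem.List.mem_pyRange_one] at hi
  simp [List.contains_eq_mem, hmem i, hi.1, hi.2]

-- B's dict is built from pairs with distinct fresh keys, so its items are the pair list itself
lemma pvB_items (unreporting : List Int) (total : Int) :
    get_node_id_map_alt unreporting total
      = PySem.List.enumerate (pvRep unreporting total) 0 := by
  unfold get_node_id_map_alt
  dsimp only
  rw [show (fun (st : List Int × Int) u => (st.1 ++ PySem.List.pyRange st.2 u 1, u + 1))
        = pvStep from rfl]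
  rw [pvB_values unreporting total]
  unfold PySem.Dict.ofList PySem.Dict.update
  have hnd : (List.map (fun (x : Int × Int) => x.1)
      (PySem.List.enumerate (pvRep unreporting total) 0)).Nodup := by
    rw [PySem.List.map_fst_enumerate,
      show (0 : Int) + (((pvRep unreporting total).length : Nat) : Int)
        = (((pvRep unreporting total).length : Nat) : Int) by ring,
      PySem.List.pyRange_zero_natCast]
    exact List.Nodup.map (fun a b hab => by exact_mod_cast hab) List.nodup_range
  have hfold := PySem.Dict.items_foldl_insert_fresh
    (PySem.List.enumerate (pvRep unreporting total) 0)
    (fun (p : Int × Int) => p.1) (fun (p : Int × Int) => p.2) PySem.Dict.empty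
    (fun a _ => by simp) hnd
  rw [hfold]
  simp [show (PySem.Dict.empty : PySem.Dict Int Int).items = [] from rfl]

lemma pvRange_nonpos (t : Int) (h : t ≤ 0) : PySem.List.pyRange 0 t = [] := by
  rcases List.eq_nil_or_concat (PySem.List.pyRange 0 t) with hn | ⟨l, x, hx⟩
  · exact hn
  · exfalso
    have : x ∈ PySem.List.pyRange 0 t := by rw [hx]; simp
    rw [PySem.List.mem_pyRange_one] at this
    omega

-- ===== VERDICT (by name: the statement is the Claim_ definition above) =====
theorem get_node_id_map_spec : Claim_equal_get_node_id_map := by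
  intro unreporting total _
  unfold Spec_get_node_id_map
  rw [pvB_items]
  by_cases h : 0 ≤ total
  · have := (pvALoop_inv unreporting total.toNat).1
    rw [Int.toNat_of_nonneg h] at this
    exact this
  · have hnil : PySem.List.pyRange 0 total = [] := pvRange_nonpos total (by omega)
    simp [get_node_id_map, pvRep, hnil,
      show (PySem.Dict.empty : PySem.Dict Int Int).items = [] from rfl]
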